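-- pv_equiv track=rewrite | github.com/abraham-harris/band-decomp-knot-theory | band_env.py | reduce_list
-- ===== SOURCE A (Python) =====
-- def reduce_list(lis):
--   jjj=0
--   while jjj < len(lis)-1:
--     if lis[jjj]==-lis[jjj+1]:
--       del lis[jjj+1]
--       del lis[jjj]
--       if jjj>0:
--         jjj-=1
--     else:
--       jjj+=1
--   return lis
-- ===== SOURCE B (Python) =====
-- def reduce_list(lis):
--   st = []
--   for x in lis:
--     if st and st[-1] == -x:
--       st.pop()
--     else:
--       st.append(x)
--   lis[:] = st
--   return lis
-- ===== Notes on version B (the rewrite author's own statement) =====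
-- stated objective: faster
-- what changed: Replaces the index-backtracking while loop with in-place deletions by a single left-to-right pass that pushes each element on a stack and pops when the top cancels the incoming element.
import Mathlib
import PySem

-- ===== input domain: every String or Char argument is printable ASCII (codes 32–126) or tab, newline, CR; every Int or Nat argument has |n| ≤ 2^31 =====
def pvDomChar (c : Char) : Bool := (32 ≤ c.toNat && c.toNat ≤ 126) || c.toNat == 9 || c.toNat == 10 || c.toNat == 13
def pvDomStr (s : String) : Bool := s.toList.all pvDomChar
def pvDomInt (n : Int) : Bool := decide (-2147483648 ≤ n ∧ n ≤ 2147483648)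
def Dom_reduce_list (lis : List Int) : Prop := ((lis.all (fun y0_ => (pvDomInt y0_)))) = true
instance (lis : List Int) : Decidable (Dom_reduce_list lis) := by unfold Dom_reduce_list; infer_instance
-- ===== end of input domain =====

-- B cancels adjacent opposite-sign pairs with a one-pass stack instead of A's
-- index-backtracking while loop with in-place deletions (faster: O(n) vs O(n^2)).
-- Both Pythons mutate `lis` in place to the same final contents; the theorems are about the return value.

-- ===== PORT A =====
-- A's while loop: jjj is a Python int that stays ≥ 0, ported as Nat
-- (the `if jjj>0 then jjj-1 else jjj` step is exactly Nat subtraction jjj - 1).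
def reduce_list_loop (lis : List Int) (jjj : Nat) : List Int :=
  if _h : jjj + 1 < lis.length then        -- Python: jjj < len(lis)-1
    if lis.getD jjj 0 = -(lis.getD (jjj+1) 0) then
      reduce_list_loop ((lis.eraseIdx (jjj+1)).eraseIdx jjj) (jjj - 1)
    else
      reduce_list_loop lis (jjj + 1)
  else lis
termination_by 2 * lis.length - jjj
decreasing_by
  · have h1 : (lis.eraseIdx (jjj+1)).length = lis.length - 1 :=
      List.length_eraseIdx_of_lt (by omega)
    have h2 : ((lis.eraseIdx (jjj+1)).eraseIdx jjj).length = (lis.eraseIdx (jjj+1)).length - 1 :=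
      List.length_eraseIdx_of_lt (by omega)
    omega
  · omega

def reduce_list (lis : List Int) : List Int := reduce_list_loop lis 0

-- ===== PORT B =====
-- B's loop body: if st and st[-1] == -x: st.pop() else: st.append(x)
def reduce_list_step (st : List Int) (x : Int) : List Int :=
  if st ≠ [] ∧ st.getLast? = some (-x) then st.dropLast else st ++ [x]

def reduce_list_alt (lis : List Int) : List Int := lis.foldl reduce_list_step []

-- ===== PRECONDITION & SPEC =====
def Spec_reduce_list (lis : List Int) (out : List Int) : Prop := out = reduce_list_alt lis
instance (lis : List Int) (out : List Int) : Decidable (Spec_reduce_list lis out) := by unfold Spec_reduce_list; infer_instance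

-- ===== CLAIM (what is proved, stated in full; the proofs are below) =====
def Claim_equal_reduce_list : Prop := ∀ (lis : List Int), Dom_reduce_list lis → Spec_reduce_list lis (reduce_list lis)

-- ===== LEMMAS AND PROOFS =====

-- The stack in head-first order: the common reference both ports are related to.
def frontLoop (st : List Int) (rest : List Int) : List Int :=
  match st, rest with
  | st, [] => st
  | h :: t, x :: xs => if h = -x then frontLoop t xs else frontLoop (x :: h :: t) xs
  | [], x :: xs => frontLoop [x] xs

-- B's foldl over back-of-list operations equals frontLoop on the reversed stack.
theorem foldl_step_eq_frontLoop (rest : List Int) : ∀ (st : List Int),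
    List.foldl reduce_list_step st rest = (frontLoop st.reverse rest).reverse := by
  induction rest with
  | nil => intro st; simp [frontLoop]
  | cons x xs ih =>
    intro st
    rcases hst : st.reverse with _ | ⟨h, t⟩
    · have : st = [] := by simpa using congrArg List.reverse hst
      subst this
      simp only [List.foldl, reduce_list_step]
      rw [if_neg (by simp)]
      simpa [frontLoop] using ih [x]
    · have hst' : st = (h :: t).reverse := by
        have := congrArg List.reverse hst; simpa using this
      subst hst'
      simp only [List.foldl, reduce_list_step]
      by_cases hc : h = -x
      · rw [if_pos ⟨by simp, by simp [hc]⟩]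
        rw [ih]
        simp [frontLoop, hc]
      · rw [if_neg (by simp [hc])]
        rw [ih]
        simp [frontLoop, hc]

-- A's loop at state (stack.reverse ++ (h :: rest), index = |stack|-1) computes frontLoop.
theorem loop_eq_frontLoop : ∀ (n : Nat) (rest : List Int), rest.length ≤ n →
    ∀ (h : Int) (t : List Int),
    reduce_list_loop (t.reverse ++ (h :: rest)) t.length = (frontLoop (h :: t) rest).reverse := by
  intro n
  induction n with
  | zero =>
    intro rest hlen h t
    have : rest = [] := List.length_eq_zero_iff.mp (Nat.le_zero.mp hlen)
    subst this
    rw [reduce_list_loop]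
    rw [dif_neg (by simp)]
    simp [frontLoop]
  | succ n ih =>
    intro rest hlen h t
    rcases rest with _ | ⟨x, xs⟩
    · rw [reduce_list_loop]
      rw [dif_neg (by simp)]
      simp [frontLoop]
    · rw [reduce_list_loop]
      have hlt : t.length + 1 < (t.reverse ++ (h :: x :: xs)).length := by simp
      rw [dif_pos hlt]
      have hgh : (t.reverse ++ (h :: x :: xs)).getD t.length 0 = h := by
        rw [List.getD_eq_getElem?_getD, List.getElem?_append_right (by simp)]
        simp
      have hgx : (t.reverse ++ (h :: x :: xs)).getD (t.length + 1) 0 = x := by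
        rw [List.getD_eq_getElem?_getD, List.getElem?_append_right (by simp)]
        simp
      rw [hgh, hgx]
      by_cases hc : h = -x
      · rw [if_pos hc]
        have he1 : (t.reverse ++ (h :: x :: xs)).eraseIdx (t.length + 1)
            = t.reverse ++ (h :: xs) := by
          rw [show t.length + 1 = t.reverse.length + 1 by simp]
          rw [List.eraseIdx_append_of_length_le (by simp)]
          simp
        have he2 : (t.reverse ++ (h :: xs)).eraseIdx t.length = t.reverse ++ xs := by
          rw [show t.length = t.reverse.length + 0 by simp]
          rw [List.eraseIdx_append_of_length_le (by simp)]
          simp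
        rw [he1, he2]
        rcases t with _ | ⟨h', t'⟩
        · -- jjj = 0 stays 0; the next comparison starts afresh on xs
          rcases xs with _ | ⟨y, ys⟩
          · rw [reduce_list_loop]
            rw [dif_neg (by simp)]
            simp [frontLoop, hc]
          · have := ih ys (by simp at hlen; omega) y []
            simp only [List.reverse_nil, List.nil_append, List.length_nil] at this
            simp only [List.reverse_nil, List.nil_append, List.length_nil, Nat.zero_sub]
            rw [this]
            simp [frontLoop, hc]
        · have := ih xs (by simp at hlen; omega) h' t'
          simp only [List.reverse_cons, List.append_assoc, List.singleton_append] at this ⊢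
          simp only [List.length_cons, Nat.add_sub_cancel]
          rw [this]
          simp [frontLoop, hc]
      · rw [if_neg hc]
        have := ih xs (by simp at hlen; omega) x (h :: t)
        simp only [List.reverse_cons, List.append_assoc, List.singleton_append,
          List.length_cons] at this
        rw [this]
        simp [frontLoop, hc]

-- ===== VERDICT (by name: the statement is the Claim_ definition above) =====
theorem reduce_list_spec : Claim_equal_reduce_list := by
  intro lis _
  unfold Spec_reduce_list reduce_list reduce_list_alt
  rw [foldl_step_eq_frontLoop]
  rcases lis with _ | ⟨y, ys⟩
  · rw [reduce_list_loop]; simp [frontLoop]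
  · have := loop_eq_frontLoop ys.length ys le_rfl y []
    simp only [List.reverse_nil, List.nil_append, List.length_nil] at this
    rw [this]
    simp [frontLoop]
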